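-- pv_equiv track=rewrite | github.com/cfrant01/bn-sketches-pipeline | traces_to_sketch_properties.py | chain_to_formula
-- ===== SOURCE A (Python) =====
-- from typing import Iterable, List, Sequence, Tuple
--
-- def state_to_hctl_formula(state: Sequence[int], genes: Sequence[str]) -> str:
--     if len(state) != len(genes):
--         raise ValueError("State length does not match genes length.")
--     literals = [gene if bit == 1 else f"~{gene}" for gene, bit in zip(genes, state)]
--     return "(" + " & ".join(literals) + ")"
--
-- def chain_to_formula(states: Sequence[Tuple[int, ...]], genes: Sequence[str]) -> str:
--     if len(states) < 2:
--         raise ValueError("Trace chain needs at least 2 states.")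
--     encoded = [state_to_hctl_formula(state, genes) for state in states]
--     inner = encoded[-1]
--     for state in reversed(encoded[:-1]):
--         inner = f"{state} & EF({inner})"
--     return f"3{{x}}: ( @{{x}}: ( {inner} ) )"
-- ===== SOURCE B (Python) =====
-- def state_to_hctl_formula(state, genes):
--     if len(state) != len(genes):
--         raise ValueError("State length does not match genes length.")
--     literals = [gene if bit == 1 else f"~{gene}" for gene, bit in zip(genes, state)]
--     return "(" + " & ".join(literals) + ")"
--
-- def chain_to_formula(states, genes):
--     if len(states) < 2:
--         raise ValueError("Trace chain needs at least 2 states.")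
--     # single flat pass: emit every character group left to right, then the run
--     # of closing parentheses, instead of wrapping an accumulator right-to-left
--     parts = ["3{x}: ( @{x}: ( "]
--     for i, state in enumerate(states):
--         if len(state) != len(genes):
--             raise ValueError("State length does not match genes length.")
--         if i:
--             parts.append(" & EF(")
--         parts.append("(")
--         for j, (gene, bit) in enumerate(zip(genes, state)):
--             if j:
--                 parts.append(" & ")
--             if bit != 1:
--                 parts.append("~")
--             parts.append(gene)
--         parts.append(")")
--     parts.append(")" * (len(states) - 1))
--     parts.append(" ) )")
--     return "".join(parts)
-- ===== Notes on version B (the rewrite author's own statement) =====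
-- stated objective: alternative
-- what changed: B replaces A's encode-then-reversed-accumulator wrapping with a single left-to-right flat emitter: one enumerate pass appends each state's literals and ' & EF(' separators to a parts list and finishes with a computed run of (len-1) closing parentheses, with no per-state string helper and no right fold.
import Mathlib
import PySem

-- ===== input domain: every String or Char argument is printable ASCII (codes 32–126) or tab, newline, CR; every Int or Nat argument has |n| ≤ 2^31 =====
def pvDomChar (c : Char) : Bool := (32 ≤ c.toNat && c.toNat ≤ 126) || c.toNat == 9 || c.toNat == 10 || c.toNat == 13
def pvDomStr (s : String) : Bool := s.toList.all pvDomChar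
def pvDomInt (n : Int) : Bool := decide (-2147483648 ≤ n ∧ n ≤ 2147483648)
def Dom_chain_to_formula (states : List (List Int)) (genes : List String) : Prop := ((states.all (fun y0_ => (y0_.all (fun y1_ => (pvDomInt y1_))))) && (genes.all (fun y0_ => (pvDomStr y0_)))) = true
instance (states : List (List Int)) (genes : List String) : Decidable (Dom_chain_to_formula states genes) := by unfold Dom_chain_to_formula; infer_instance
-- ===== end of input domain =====

-- B replaces A's encode-then-reversed-accumulator wrapping by one flat left-to-right
-- emitter pass (enumerate + separators + a computed run of closing parentheses).
-- A raises ValueError when len(states) < 2 or a state's length differs from len(genes);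
-- Pre_ excludes exactly those inputs. Strings built on List Char (PySem.Chars), exact here.

-- ===== PORT A =====
-- helper state_to_hctl_formula of A (its raising branch is outside Pre_; returns [] there)
def stateHctlA (state : List Int) (genes : List String) : List Char :=
  if state.length ≠ genes.length then [] else
    let literals := (genes.zip state).map (fun gb => if gb.2 = 1 then gb.1.toList else '~' :: gb.1.toList)
    '(' :: PySem.Chars.join " & ".toList literals ++ [')']

def chain_to_formula (states : List (List Int)) (genes : List String) : String :=
  if states.length < 2 then "" else
    let encoded := states.map (fun s => stateHctlA s genes)
    let inner := ((PySem.List.slice encoded none (some (-1))).reverse).foldl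
        (fun inner st => st ++ " & EF(".toList ++ inner ++ [')'])
        ((PySem.List.pyGet? encoded (-1)).getD [])
    String.ofList ("3{x}: ( @{x}: ( ".toList ++ inner ++ " ) )".toList)

-- ===== PORT B =====
-- the in-loop ValueError of Source B (a state of the wrong length) is hoisted to one guard:
-- Source B raises iff some state mismatches, and both raising branches are outside Pre_.
def chain_to_formula_alt (states : List (List Int)) (genes : List String) : String :=
  if states.length < 2 then "" else
  if states.any (fun s => s.length ≠ genes.length) then "" else
    let body := (PySem.List.enumerate states 0).foldl (fun acc is =>
        ((PySem.List.enumerate (genes.zip is.2) 0).foldl (fun a jp =>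
            ((if jp.1 = 0 then a else a ++ " & ".toList) ++
              (if jp.2.2 ≠ 1 then ['~'] else [])) ++ jp.2.1.toList)
          ((if is.1 = 0 then acc else acc ++ " & EF(".toList) ++ ['('])) ++ [')']) []
    String.ofList ("3{x}: ( @{x}: ( ".toList ++ body
      ++ List.replicate (states.length - 1) ')' ++ " ) )".toList)

-- ===== PRECONDITION & SPEC =====
-- Pre_: Python A raises ValueError when states has fewer than 2 states or a state's
-- length differs from the number of genes; exactly those inputs are excluded.
def Pre_chain_to_formula (states : List (List Int)) (genes : List String) : Prop :=
  2 ≤ states.length ∧ ∀ s ∈ states, s.length = genes.length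
instance (states : List (List Int)) (genes : List String) : Decidable (Pre_chain_to_formula states genes) := by unfold Pre_chain_to_formula; infer_instance

def pvWitness_chain_to_formula : List (List Int) × List String := ([[1, 0], [0, 1]], ["a", "b"])

def Spec_chain_to_formula (states : List (List Int)) (genes : List String) (out : String) : Prop := out = chain_to_formula_alt states genes
instance (states : List (List Int)) (genes : List String) (out : String) : Decidable (Spec_chain_to_formula states genes out) := by unfold Spec_chain_to_formula; infer_instance

-- ===== CLAIM (what is proved, stated in full; the proofs are below) =====
def Claim_equal_chain_to_formula : Prop := ∀ (states : List (List Int)) (genes : List String), Dom_chain_to_formula states genes → Pre_chain_to_formula states genes → Spec_chain_to_formula states genes (chain_to_formula states genes)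

-- ===== LEMMAS AND PROOFS =====

-- join as head ++ flatMap of separated tails
theorem join_eq_flat (sep : List Char) (x : List Char) (xs : List (List Char)) :
    PySem.Chars.join sep (x :: xs) = x ++ xs.flatMap (fun y => sep ++ y) := by
  induction xs generalizing x with
  | nil => simp [PySem.Chars.join_singleton]
  | cons y t ih => rw [PySem.Chars.join_cons_cons, ih y]; simp

-- an indexed fold whose step prepends sep exactly when the index is nonzero,
-- over enumerate starting at k ≥ 1: every element gets the separator
theorem foldl_enumerate_flat {α : Type} (sep : List Char) (f : α → List Char)
    (step : List Char → Int × α → List Char)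
    (l : List α)
    (hstep : ∀ acc i x, x ∈ l → step acc (i, x) = (if i = 0 then acc else acc ++ sep) ++ f x) :
    ∀ (acc : List Char) (k : Int), 1 ≤ k →
      (PySem.List.enumerate l k).foldl step acc = acc ++ (l.map f).flatMap (fun y => sep ++ y) := by
  induction l with
  | nil => intro acc k _; simp [PySem.List.enumerate_nil]
  | cons x t ih =>
    intro acc k hk
    rw [PySem.List.enumerate_cons, List.foldl_cons, hstep _ _ _ (by simp),
        if_neg (by omega), ih (fun a i x hx => hstep a i x (by simp [hx])) _ (k + 1) (by omega)]
    simp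

-- the same fold over enumerate from 0 computes join
theorem foldl_enumerate_join {α : Type} (sep : List Char) (f : α → List Char)
    (step : List Char → Int × α → List Char)
    (l : List α)
    (hstep : ∀ acc i x, x ∈ l → step acc (i, x) = (if i = 0 then acc else acc ++ sep) ++ f x)
    (acc : List Char) :
    (PySem.List.enumerate l 0).foldl step acc = acc ++ PySem.Chars.join sep (l.map f) := by
  cases l with
  | nil => simp [PySem.List.enumerate_nil, PySem.Chars.join_nil]
  | cons x t =>
    rw [PySem.List.enumerate_cons, List.foldl_cons, hstep _ _ _ (by simp), if_pos rfl]
    simp only [zero_add]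
    rw [foldl_enumerate_flat sep f step t (fun a i x hx => hstep a i x (by simp [hx])) _ 1 le_rfl,
        List.map_cons, join_eq_flat]
    simp

-- B's inner fold over one state equals A's helper (when the lengths match)
theorem inner_fold_eq (s : List Int) (genes : List String) (acc : List Char)
    (hlen : s.length = genes.length) :
    ((PySem.List.enumerate (genes.zip s) 0).foldl (fun a jp =>
        ((if jp.1 = 0 then a else a ++ " & ".toList) ++
          (if jp.2.2 ≠ 1 then ['~'] else [])) ++ jp.2.1.toList) (acc ++ ['('])) ++ [')']
      = acc ++ stateHctlA s genes := by
  rw [foldl_enumerate_join " & ".toList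
      (fun gb => (if gb.2 ≠ 1 then ['~'] else []) ++ gb.1.toList)
      _ _ (by intro a i x _; by_cases h : i = 0 <;> simp [h])]
  unfold stateHctlA
  rw [if_neg (by omega)]
  have hm : (genes.zip s).map (fun gb => (if gb.2 ≠ 1 then ['~'] else []) ++ gb.1.toList)
      = (genes.zip s).map (fun gb => if gb.2 = 1 then gb.1.toList else '~' :: gb.1.toList) := by
    apply List.map_congr_left; intro gb _; by_cases h : gb.2 = 1 <;> simp [h]
  rw [hm]; simp

-- A's loop body as a structural recursion: efNest l s folds l from the right around seed s
def efNest (l : List (List Char)) (s : List Char) : List Char :=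
  match l with
  | [] => s
  | x :: xs => x ++ " & EF(".toList ++ efNest xs s ++ [')']

theorem foldl_reverse_efNest (l : List (List Char)) (s : List Char) :
    l.reverse.foldl (fun inner st => st ++ " & EF(".toList ++ inner ++ [')']) s = efNest l s := by
  induction l generalizing s with
  | nil => rfl
  | cons x xs ih =>
    rw [List.reverse_cons, List.foldl_append, ih]
    rfl

-- closed form: nesting over dropLast with the last element as seed = join + closing parens
theorem efNest_closed (e : List Char) (rest : List (List Char)) :
    efNest (e :: rest).dropLast ((e :: rest).getLast (by simp)) =
      PySem.Chars.join " & EF(".toList (e :: rest) ++ List.replicate rest.length ')' := by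
  induction rest generalizing e with
  | nil => simp [efNest, PySem.Chars.join_singleton]
  | cons r t ih =>
    have hd : (e :: r :: t).dropLast = e :: (r :: t).dropLast := by simp
    have hl : (e :: r :: t).getLast (by simp) = (r :: t).getLast (by simp) := by
      simp [List.getLast_cons]
    rw [hd, PySem.Chars.join_cons_cons]
    show e ++ " & EF(".toList ++ efNest (r :: t).dropLast ((e :: r :: t).getLast (by simp)) ++ [')'] = _
    rw [hl, ih r]
    simp [List.replicate_succ' (n := t.length)]

-- ===== VERDICT (by name: the statement is the Claim_ definition above) =====
theorem chain_to_formula_spec : Claim_equal_chain_to_formula := by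
  intro states genes _ hpre
  obtain ⟨hlen, hall⟩ := hpre
  unfold Spec_chain_to_formula chain_to_formula chain_to_formula_alt
  rw [if_neg (show ¬ states.length < 2 by omega), if_neg (show ¬ states.length < 2 by omega),
      if_neg (by simp only [List.any_eq_true, not_exists]; push Not; intro s hs; simp [hall s hs])]
  dsimp only
  -- B's outer fold = join " & EF(" over the A-encodings
  rw [foldl_enumerate_join " & EF(".toList (fun s => stateHctlA s genes)
      _ states (by
        intro a i x hx
        dsimp only
        rw [inner_fold_eq x genes _ (hall x hx)])]
  -- A's reversed fold = the same join plus the closing-paren run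
  set encoded := states.map (fun s => stateHctlA s genes) with hdef
  obtain ⟨e, rest, hER⟩ : ∃ e rest, encoded = e :: rest := by
    rw [hdef]
    cases states with
    | nil => simp at hlen
    | cons a b => exact ⟨_, _, rfl⟩
  rw [hER]
  rw [PySem.List.slice_to_neg_one, PySem.List.pyGet?_neg_one]
  have hlast : (e :: rest).getLast?.getD [] = (e :: rest).getLast (by simp) := by
    rw [List.getLast?_eq_some_getLast (by simp)]; rfl
  rw [hlast, foldl_reverse_efNest, efNest_closed]
  have hrl : rest.length = states.length - 1 := by
    have := congrArg List.length hER
    simp [hdef] at this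
    omega
  rw [hrl]
  simp
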